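-- pv_equiv track=rewrite | github.com/webeet-io/layered-populate-data-pool-da | db_population_utils/data_processor/column_standardizer.py | _get_column_recommendations
-- ===== SOURCE A (Python) =====
-- from typing import List, Dict, Any, Tuple
--
-- def _get_column_recommendations(columns: List[str], issues: List[str]) -> List[str]:
--     """Get recommendations for column improvements"""
--     recommendations = []
--
--     if any('special characters' in issue for issue in issues):
--         recommendations.append("Use standardize_columns() to clean special characters")
--
--     if any('spaces' in issue for issue in issues):
--         recommendations.append("Replace spaces with underscores")
--
--     if any('uppercase' in issue for issue in issues):
--         recommendations.append("Consider using lowercase for better consistency")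
--
--     if any('Appears' in issue and 'times' in issue for issue in issues):
--         recommendations.append("Resolve duplicate column names")
--
--     return recommendations
-- ===== SOURCE B (Python) =====
-- def _get_column_recommendations(columns, issues):
--     # One pass over issues accumulating four flags, then emit the fixed strings.
--     special = spaces = upper = dup = False
--     for issue in issues:
--         special = special or 'special characters' in issue
--         spaces = spaces or 'spaces' in issue
--         upper = upper or 'uppercase' in issue
--         dup = dup or ('Appears' in issue and 'times' in issue)
--     recs = []
--     if special:
--         recs.append("Use standardize_columns() to clean special characters")
--     if spaces:
--         recs.append("Replace spaces with underscores")
--     if upper: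
--         recs.append("Consider using lowercase for better consistency")
--     if dup:
--         recs.append("Resolve duplicate column names")
--     return recs
-- ===== Notes on version B (the rewrite author's own statement) =====
-- stated objective: alternative
-- what changed: Replaces four independent any() scans over issues with a single pass that accumulates four boolean flags, then appends the fixed recommendation strings guarded by those flags.
import Mathlib
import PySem

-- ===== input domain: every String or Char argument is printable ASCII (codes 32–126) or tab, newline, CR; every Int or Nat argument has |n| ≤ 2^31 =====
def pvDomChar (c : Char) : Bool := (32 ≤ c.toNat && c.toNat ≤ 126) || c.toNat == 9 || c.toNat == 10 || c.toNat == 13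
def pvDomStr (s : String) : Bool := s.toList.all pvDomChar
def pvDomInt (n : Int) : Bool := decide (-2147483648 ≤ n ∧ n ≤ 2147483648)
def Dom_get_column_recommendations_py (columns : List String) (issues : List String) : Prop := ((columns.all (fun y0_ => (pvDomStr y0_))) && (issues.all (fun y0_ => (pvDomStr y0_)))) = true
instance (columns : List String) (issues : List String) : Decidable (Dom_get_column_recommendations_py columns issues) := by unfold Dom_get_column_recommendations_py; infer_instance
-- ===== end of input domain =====

-- ===== PORT A =====
-- Literal port of A: four independent any-scans, each appending one fixed string.
def get_column_recommendations_py (columns : List String) (issues : List String) : List String :=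
  let recommendations : List String := []
  let recommendations :=
    if issues.any (fun issue => PySem.Str.isIn "special characters" issue) then
      recommendations ++ ["Use standardize_columns() to clean special characters"]
    else recommendations
  let recommendations :=
    if issues.any (fun issue => PySem.Str.isIn "spaces" issue) then
      recommendations ++ ["Replace spaces with underscores"]
    else recommendations
  let recommendations :=
    if issues.any (fun issue => PySem.Str.isIn "uppercase" issue) then
      recommendations ++ ["Consider using lowercase for better consistency"]
    else recommendations
  let recommendations :=
    if issues.any (fun issue => PySem.Str.isIn "Appears" issue && PySem.Str.isIn "times" issue) then
      recommendations ++ ["Resolve duplicate column names"]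
    else recommendations
  recommendations

-- ===== PORT B =====
-- Port of B: one fold over issues accumulating four flags, then guarded appends.
def get_column_recommendations_py_alt (columns : List String) (issues : List String) : List String :=
  let flags : Bool × Bool × Bool × Bool :=
    issues.foldl
      (fun s issue =>
        (s.1 || PySem.Str.isIn "special characters" issue,
         s.2.1 || PySem.Str.isIn "spaces" issue,
         s.2.2.1 || PySem.Str.isIn "uppercase" issue,
         s.2.2.2 || (PySem.Str.isIn "Appears" issue && PySem.Str.isIn "times" issue)))
      (false, false, false, false)
  let recs : List String := []
  let recs := if flags.1 then recs ++ ["Use standardize_columns() to clean special characters"] else recs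
  let recs := if flags.2.1 then recs ++ ["Replace spaces with underscores"] else recs
  let recs := if flags.2.2.1 then recs ++ ["Consider using lowercase for better consistency"] else recs
  let recs := if flags.2.2.2 then recs ++ ["Resolve duplicate column names"] else recs
  recs

-- ===== PRECONDITION & SPEC =====
def Spec_get_column_recommendations_py (columns : List String) (issues : List String) (out : List String) : Prop := out = get_column_recommendations_py_alt columns issues
instance (columns : List String) (issues : List String) (out : List String) : Decidable (Spec_get_column_recommendations_py columns issues out) := by unfold Spec_get_column_recommendations_py; infer_instance

-- ===== CLAIM (what is proved, stated in full; the proofs are below) =====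
def Claim_equal_get_column_recommendations_py : Prop := ∀ (columns : List String) (issues : List String), Dom_get_column_recommendations_py columns issues → Spec_get_column_recommendations_py columns issues (get_column_recommendations_py columns issues)

-- ===== LEMMAS AND PROOFS =====

-- The single fold computes the four any-scans in one pass.
theorem foldl_four_flags (l : List String) (p1 p2 p3 p4 : String → Bool)
    (b1 b2 b3 b4 : Bool) :
    l.foldl (fun s x => (s.1 || p1 x, s.2.1 || p2 x, s.2.2.1 || p3 x, s.2.2.2 || p4 x))
      (b1, b2, b3, b4)
      = (b1 || l.any p1, b2 || l.any p2, b3 || l.any p3, b4 || l.any p4) := by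
  induction l generalizing b1 b2 b3 b4 with
  | nil => simp
  | cons h t ih => simp [List.foldl, ih, Bool.or_assoc]

-- ===== VERDICT (by name: the statement is the Claim_ definition above) =====
theorem get_column_recommendations_py_spec : Claim_equal_get_column_recommendations_py := by
  intro columns issues _
  unfold Spec_get_column_recommendations_py
  unfold get_column_recommendations_py get_column_recommendations_py_alt
  simp [foldl_four_flags]
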